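-- pv_equiv track=rewrite | github.com/the-polymath/Python-practicals | Practical 9/prac_9_3.py | reverseceasar
-- ===== SOURCE A (Python) =====
-- def reverseceasar(string, key):
--     temp = ""
--     for i in string:
--         if i == " ":
--             temp += i
--             continue
--         ch = ord(i)
--         if ch > 64 and ch < 91:
--             temp += chr((ch - 65 + key) % 26 + 65)
--         elif ch > 96 and ch < 123:
--             temp += chr((ch - 97 + key) % 26 + 97)
--
--     temp = temp[::-1]
--     return temp
-- ===== SOURCE B (Python) =====
-- def reverseceasar(string, key):
--     # Build a translation table once, filter, translate in one pass, reverse.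
--     upper = 'ABCDEFGHIJKLMNOPQRSTUVWXYZ'
--     lower = 'abcdefghijklmnopqrstuvwxyz'
--     shifted = ''.join(chr((i + key) % 26 + 65) for i in range(26)) + \
--               ''.join(chr((i + key) % 26 + 97) for i in range(26))
--     table = str.maketrans(upper + lower, shifted)
--     filtered = ''.join(c for c in string
--                        if c == ' ' or 65 <= ord(c) <= 90 or 97 <= ord(c) <= 122)
--     return filtered.translate(table)[::-1]
-- ===== Notes on version B (the rewrite author's own statement) =====
-- stated objective: idiomatic
-- what changed: Replaces A's per-character shift arithmetic inside the loop by a 52-entry translation table built once with str.maketrans, applied via a filter + str.translate pass, then reversed with slicing.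
import Mathlib
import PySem

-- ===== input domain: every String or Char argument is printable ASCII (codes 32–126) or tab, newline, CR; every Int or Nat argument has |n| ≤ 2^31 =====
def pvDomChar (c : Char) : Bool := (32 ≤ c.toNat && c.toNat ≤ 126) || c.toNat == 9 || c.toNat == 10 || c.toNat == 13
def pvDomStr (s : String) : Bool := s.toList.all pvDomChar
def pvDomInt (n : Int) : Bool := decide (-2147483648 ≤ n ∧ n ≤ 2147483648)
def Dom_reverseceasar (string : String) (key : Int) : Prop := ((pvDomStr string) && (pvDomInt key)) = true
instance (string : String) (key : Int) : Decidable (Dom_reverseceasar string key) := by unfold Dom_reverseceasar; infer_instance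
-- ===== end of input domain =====

-- B replaces A's per-character shift arithmetic inside the loop by a translation table
-- built once (Python str.maketrans/translate) applied to the filtered string, then reversed
-- (objective: idiomatic; same asymptotic cost).

-- ===== PORT A =====
-- A builds temp left to right (space kept; letters shifted; everything else dropped), then reverses.
def reverseceasar (string : String) (key : Int) : String :=
  let temp := string.toList.foldl (fun temp i =>
    if i == ' ' then temp ++ [i]
    else
      let ch : Int := i.toNat
      if 64 < ch ∧ ch < 91 then temp ++ [Char.ofNat ((PySem.Int.mod (ch - 65 + key) 26 + 65).toNat)]
      else if 96 < ch ∧ ch < 123 then temp ++ [Char.ofNat ((PySem.Int.mod (ch - 97 + key) 26 + 97).toNat)]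
      else temp) ([] : List Char)
  String.mk temp.reverse

-- ===== PORT B =====
-- shifted alphabet strings, as the two join'ed generator expressions in Source B
def pvShiftedVals (key : Int) : List Char :=
  (List.range 26).map (fun (i : Nat) => Char.ofNat ((PySem.Int.mod ((i : Int) + key) 26 + 65).toNat)) ++
  (List.range 26).map (fun (i : Nat) => Char.ofNat ((PySem.Int.mod ((i : Int) + key) 26 + 97).toNat))

-- str.maketrans(upper+lower, shifted): a dict from the zipped pairs
def pvTable (key : Int) : PySem.Dict Char Char :=
  PySem.Dict.ofList (("ABCDEFGHIJKLMNOPQRSTUVWXYZabcdefghijklmnopqrstuvwxyz".toList).zip (pvShiftedVals key))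

def pvKeep (c : Char) : Bool := c == ' ' || (65 ≤ c.toNat && c.toNat ≤ 90) || (97 ≤ c.toNat && c.toNat ≤ 122)

def reverseceasar_alt (string : String) (key : Int) : String :=
  let table := pvTable key
  let filtered := string.toList.filter pvKeep
  -- translate: a char maps to its table entry, or to itself when absent (the space)
  String.mk ((filtered.map (fun c => table.getD c c)).reverse)

-- ===== PRECONDITION & SPEC =====
def Spec_reverseceasar (string : String) (key : Int) (out : String) : Prop := out = reverseceasar_alt string key
instance (string : String) (key : Int) (out : String) : Decidable (Spec_reverseceasar string key out) := by unfold Spec_reverseceasar; infer_instance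

-- ===== CLAIM (what is proved, stated in full; the proofs are below) =====
def Claim_equal_reverseceasar : Prop := ∀ (string : String) (key : Int), Dom_reverseceasar string key → Spec_reverseceasar string key (reverseceasar string key)

-- ===== LEMMAS AND PROOFS =====

-- the per-character effect both programs implement
def pvEmit (key : Int) (i : Char) : Option Char :=
  if i == ' ' then some i
  else
    let ch : Int := i.toNat
    if 64 < ch ∧ ch < 91 then some (Char.ofNat ((PySem.Int.mod (ch - 65 + key) 26 + 65).toNat))
    else if 96 < ch ∧ ch < 123 then some (Char.ofNat ((PySem.Int.mod (ch - 97 + key) 26 + 97).toNat))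
    else none

lemma reverseceasar_foldl (key : Int) (l : List Char) (acc : List Char) :
    l.foldl (fun temp i =>
      if i == ' ' then temp ++ [i]
      else
        let ch : Int := i.toNat
        if 64 < ch ∧ ch < 91 then temp ++ [Char.ofNat ((PySem.Int.mod (ch - 65 + key) 26 + 65).toNat)]
        else if 96 < ch ∧ ch < 123 then temp ++ [Char.ofNat ((PySem.Int.mod (ch - 97 + key) 26 + 97).toNat)]
        else temp) acc = acc ++ l.filterMap (pvEmit key) := by
  induction l generalizing acc with
  | nil => simp
  | cons c l ih =>
    simp only [List.foldl_cons, List.filterMap_cons, ih, pvEmit]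
    by_cases h1 : c == ' '
    · simp [h1]
    · by_cases h2 : 64 < c.toNat ∧ c.toNat < 91
      · simp [h1, h2]
      · by_cases h3 : 96 < c.toNat ∧ c.toNat < 123
        · simp [h1, h2, h3]
        · simp [h1, h2, h3]

lemma table_items (key : Int) :
    (pvTable key).items =
      ("ABCDEFGHIJKLMNOPQRSTUVWXYZabcdefghijklmnopqrstuvwxyz".toList).zip (pvShiftedVals key) := by
  have hlen : ("ABCDEFGHIJKLMNOPQRSTUVWXYZabcdefghijklmnopqrstuvwxyz".toList).length
      = (pvShiftedVals key).length := by
    simp [pvShiftedVals]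
  have hfst : (("ABCDEFGHIJKLMNOPQRSTUVWXYZabcdefghijklmnopqrstuvwxyz".toList).zip
      (pvShiftedVals key)).map Prod.fst
      = "ABCDEFGHIJKLMNOPQRSTUVWXYZabcdefghijklmnopqrstuvwxyz".toList :=
    List.map_fst_zip (le_of_eq hlen)
  have hnd : ((("ABCDEFGHIJKLMNOPQRSTUVWXYZabcdefghijklmnopqrstuvwxyz".toList).zip
      (pvShiftedVals key)).map Prod.fst).Nodup := by
    rw [hfst]; decide
  show (PySem.Dict.empty.update _).items = _
  unfold PySem.Dict.update
  rw [PySem.Dict.items_foldl_insert_fresh _ Prod.fst Prod.snd PySem.Dict.empty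
      (by intro a _; simp [PySem.Dict.contains_empty]) hnd]
  simp [PySem.Dict.empty]

lemma table_keys_nodup (key : Int) : (pvTable key).keys.Nodup := by
  have hlen : ("ABCDEFGHIJKLMNOPQRSTUVWXYZabcdefghijklmnopqrstuvwxyz".toList).length
      = (pvShiftedVals key).length := by
    simp [pvShiftedVals]
  show ((pvTable key).items.map Prod.fst).Nodup
  rw [table_items, List.map_fst_zip (le_of_eq hlen)]
  decide

-- the zip behind the table, in map-over-range form
lemma table_items_map (key : Int) :
    (pvTable key).items =
      (List.range 26).map (fun (i : Nat) => (Char.ofNat (65 + i), Char.ofNat ((PySem.Int.mod ((i : Int) + key) 26 + 65).toNat))) ++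
      (List.range 26).map (fun (i : Nat) => (Char.ofNat (97 + i), Char.ofNat ((PySem.Int.mod ((i : Int) + key) 26 + 97).toNat))) := by
  rw [table_items]
  have hU : "ABCDEFGHIJKLMNOPQRSTUVWXYZ".toList = (List.range 26).map (fun (i : Nat) => Char.ofNat (65 + i)) := by decide
  have hL : "abcdefghijklmnopqrstuvwxyz".toList = (List.range 26).map (fun (i : Nat) => Char.ofNat (97 + i)) := by decide
  have hsplit : "ABCDEFGHIJKLMNOPQRSTUVWXYZabcdefghijklmnopqrstuvwxyz".toList
      = "ABCDEFGHIJKLMNOPQRSTUVWXYZ".toList ++ "abcdefghijklmnopqrstuvwxyz".toList := by decide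
  rw [hsplit, hU, hL, pvShiftedVals,
    List.zip_append (by simp), List.zip_map', List.zip_map']

lemma table_getD_space (key : Int) : (pvTable key).getD ' ' ' ' = ' ' := by
  apply PySem.Dict.getD_of_not_contains
  rw [PySem.Dict.contains_eq_decide_mem_keys]
  have : (pvTable key).keys = "ABCDEFGHIJKLMNOPQRSTUVWXYZabcdefghijklmnopqrstuvwxyz".toList := by
    show (pvTable key).items.map Prod.fst = _
    rw [table_items]
    exact List.map_fst_zip (le_of_eq (by simp [pvShiftedVals]))
  rw [this]; decide

lemma table_getD_upper (key : Int) (c : Char) (h1 : 65 ≤ c.toNat) (h2 : c.toNat ≤ 90) :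
    (pvTable key).getD c c = Char.ofNat ((PySem.Int.mod ((c.toNat : Int) - 65 + key) 26 + 65).toNat) := by
  have hj : c.toNat - 65 < 26 := by omega
  have hc : c = Char.ofNat (65 + (c.toNat - 65)) := by
    conv_lhs => rw [← Char.ofNat_toNat c]
    congr 1; omega
  have hmem : (Char.ofNat (65 + (c.toNat - 65)),
      Char.ofNat ((PySem.Int.mod (((c.toNat - 65 : Nat) : Int) + key) 26 + 65).toNat)) ∈ (pvTable key).items := by
    rw [table_items_map]
    exact List.mem_append_left _ (List.mem_map_of_mem (List.mem_range.mpr hj))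
  have := PySem.Dict.getD_of_mem_items _ hmem (table_keys_nodup key) c
  rw [← hc, show (((c.toNat - 65 : Nat) : Int) + key) = ((c.toNat : Int) - 65 + key) from by omega] at this
  rw [this]

lemma table_getD_lower (key : Int) (c : Char) (h1 : 97 ≤ c.toNat) (h2 : c.toNat ≤ 122) :
    (pvTable key).getD c c = Char.ofNat ((PySem.Int.mod ((c.toNat : Int) - 97 + key) 26 + 97).toNat) := by
  have hj : c.toNat - 97 < 26 := by omega
  have hc : c = Char.ofNat (97 + (c.toNat - 97)) := by
    conv_lhs => rw [← Char.ofNat_toNat c]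
    congr 1; omega
  have hmem : (Char.ofNat (97 + (c.toNat - 97)),
      Char.ofNat ((PySem.Int.mod (((c.toNat - 97 : Nat) : Int) + key) 26 + 97).toNat)) ∈ (pvTable key).items := by
    rw [table_items_map]
    exact List.mem_append_right _ (List.mem_map_of_mem (List.mem_range.mpr hj))
  have := PySem.Dict.getD_of_mem_items _ hmem (table_keys_nodup key) c
  rw [← hc, show (((c.toNat - 97 : Nat) : Int) + key) = ((c.toNat : Int) - 97 + key) from by omega] at this
  rw [this]

lemma filter_map_eq_filterMap (key : Int) (l : List Char) :
    (l.filter pvKeep).map (fun c => (pvTable key).getD c c) = l.filterMap (pvEmit key) := by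
  induction l with
  | nil => simp
  | cons c l ih =>
    simp only [List.filter_cons, List.filterMap_cons]
    by_cases hsp : c = ' '
    · subst hsp
      rw [if_pos (by decide)]
      simp only [List.map_cons, ih, table_getD_space]
      simp [pvEmit]
    · by_cases hu : 65 ≤ c.toNat ∧ c.toNat ≤ 90
      · rw [if_pos (by simp [pvKeep, hsp]; omega)]
        simp only [List.map_cons, ih, table_getD_upper key c hu.1 hu.2]
        have hsp' : (c == ' ') = false := by simpa using hsp
        simp only [pvEmit, hsp', Bool.false_eq_true, if_false]
        rw [if_pos (by omega)]
      · by_cases hlo : 97 ≤ c.toNat ∧ c.toNat ≤ 122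
        · rw [if_pos (by simp [pvKeep, hsp]; omega)]
          simp only [List.map_cons, ih, table_getD_lower key c hlo.1 hlo.2]
          have hsp' : (c == ' ') = false := by simpa using hsp
          simp only [pvEmit, hsp', Bool.false_eq_true, if_false]
          rw [if_neg (by omega), if_pos (by omega)]
        · rw [if_neg (by simp [pvKeep, hsp]; omega)]
          rw [ih]
          have hsp' : (c == ' ') = false := by simpa using hsp
          simp only [pvEmit, hsp', Bool.false_eq_true, if_false]
          rw [if_neg (by omega), if_neg (by omega)]

-- ===== VERDICT (by name: the statement is the Claim_ definition above) =====
theorem reverseceasar_spec : Claim_equal_reverseceasar := by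
  intro string key _
  show _ = _
  unfold reverseceasar reverseceasar_alt
  rw [reverseceasar_foldl]
  simp [filter_map_eq_filterMap]
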